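-- pv_equiv track=rewrite | github.com/smilingCornflower/KBTU | ADS/lab_5/D.py | mix_mixtures
-- ===== SOURCE A (Python) =====
-- import heapq
--
-- def mix_mixtures(m, densities):
--     heapq.heapify(densities)
--
--     operations = 0
--
--     while densities[0] < m:
--         if len(densities) < 2:
--             return -1
--
--         least = heapq.heappop(densities)
--         second_least = heapq.heappop(densities)
--
--         new_density = least + 2 * second_least
--
--         heapq.heappush(densities, new_density)
--
--         operations += 1
--
--     return operations
-- ===== SOURCE B (Python) =====
-- def mix_mixtures(m, densities):
--     # Maintained sorted list instead of a heap: sort once, pop the two heads,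
--     # re-insert the merged density by a linear scan.
--     # Like A, mutates its argument in place (sort + pops); equivalence is about the return value.
--     densities.sort()
--     operations = 0
--     while densities[0] < m:
--         if len(densities) < 2:
--             return -1
--         least = densities.pop(0)
--         second_least = densities.pop(0)
--         new_density = least + 2 * second_least
--         i = 0
--         while i < len(densities) and densities[i] <= new_density:
--             i += 1
--         densities.insert(i, new_density)
--         operations += 1
--     return operations
-- ===== Notes on version B (the rewrite author's own statement) =====
-- stated objective: alternative
-- what changed: Replaces the binary heap with a maintained sorted list: sort once up front, pop the two heads each round, and re-insert the merged density with a linear insertion scan instead of heap sift operations.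
import Mathlib
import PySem

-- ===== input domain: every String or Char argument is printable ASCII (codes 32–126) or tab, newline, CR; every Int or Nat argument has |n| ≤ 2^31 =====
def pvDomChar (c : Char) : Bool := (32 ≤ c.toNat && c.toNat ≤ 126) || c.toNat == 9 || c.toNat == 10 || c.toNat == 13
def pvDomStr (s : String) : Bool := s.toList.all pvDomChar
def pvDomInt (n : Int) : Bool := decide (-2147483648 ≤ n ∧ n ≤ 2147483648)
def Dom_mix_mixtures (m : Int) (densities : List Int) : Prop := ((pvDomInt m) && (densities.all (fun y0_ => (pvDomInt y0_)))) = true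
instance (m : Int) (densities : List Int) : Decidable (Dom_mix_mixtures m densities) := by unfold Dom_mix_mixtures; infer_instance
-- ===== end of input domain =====

-- B replaces A's binary heap with a maintained sorted list (sort once, pop two heads,
-- linear re-insertion); same return value; both Pythons mutate their list argument
-- in place (the equivalence proved here is about the return value only).


-- ===== PORT A =====
-- heapq is ported as a min-at-head list: exact for every value A observes
-- (densities[0] and each heappop yield the minimum of the heap's multiset, and
-- heappush adds an element); CPython's internal heap-array layout never influences
-- mix_mixtures' result, which depends only on the multiset of densities.
def pyHeapify (h : List Int) : List Int :=
  match h.min? with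
  | none => []
  | some v => v :: h.erase v

def pyHeappush (v : Int) (h : List Int) : List Int := pyHeapify (v :: h)

theorem pyHeapify_length (l : List Int) : (pyHeapify l).length = l.length := by
  unfold pyHeapify
  cases hm : l.min? with
  | none => simp [List.min?_eq_none_iff.mp hm]
  | some v =>
    have hv : v ∈ l := List.min?_mem hm
    simp [List.length_erase_of_mem hv]
    exact Nat.succ_pred_eq_of_pos (List.length_pos_of_mem hv)

def mixLoopA (m : Int) (h : List Int) (ops : Int) : Int :=
  match h with
  | [] => 0                          -- unreachable under Pre_: Python raises IndexError only on an empty input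
  | [x] => if x < m then -1 else ops -- densities[0] < m, then len(densities) < 2 → return -1
  | x :: y :: t =>
    if x < m then
      -- least = heappop(densities) = x (the heap minimum sits at index 0)
      let h1 := pyHeapify (y :: t)   -- the heap after the first pop
      let second := h1.headD 0       -- second_least = heappop(densities)
      mixLoopA m (pyHeappush (x + 2 * second) h1.tail) (ops + 1)
    else ops
  termination_by h.length
  decreasing_by
    have h1 : (pyHeapify (y :: t)).length = t.length + 1 := by
      simp [pyHeapify_length]
    simp [pyHeappush, pyHeapify_length, h1]

def mix_mixtures (m : Int) (densities : List Int) : Int :=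
  mixLoopA m (pyHeapify densities) 0

-- ===== PORT B =====
-- the linear insertion scan of Source B (inner while + list.insert)
def insortLin (v : Int) : List Int → List Int
  | [] => [v]
  | a :: t => if a ≤ v then a :: insortLin v t else v :: a :: t

theorem insortLin_length (v : Int) (s : List Int) :
    (insortLin v s).length = s.length + 1 := by
  induction s with
  | nil => rfl
  | cons a t ih => simp only [insortLin]; split <;> simp [ih]

def mixLoopB (m : Int) (s : List Int) (ops : Int) : Int :=
  match s with
  | [] => 0                          -- unreachable under Pre_
  | [x] => if x < m then -1 else ops
  | x :: y :: t =>
    if x < m then mixLoopB m (insortLin (x + 2 * y) t) (ops + 1) else ops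
  termination_by s.length
  decreasing_by simp [insortLin_length]

def mix_mixtures_alt (m : Int) (densities : List Int) : Int :=
  mixLoopB m (PySem.List.sorted densities (fun x => x)) 0

-- ===== PRECONDITION & SPEC =====
-- Pre_ excludes only the empty list, on which A raises IndexError (densities[0]); B raises there too.
def Pre_mix_mixtures (m : Int) (densities : List Int) : Prop := densities ≠ []
instance (m : Int) (densities : List Int) : Decidable (Pre_mix_mixtures m densities) := by unfold Pre_mix_mixtures; infer_instance
def pvWitness_mix_mixtures : Int × List Int := (5, [1, 2, 3])

def Spec_mix_mixtures (m : Int) (densities : List Int) (out : Int) : Prop := out = mix_mixtures_alt m densities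
instance (m : Int) (densities : List Int) (out : Int) : Decidable (Spec_mix_mixtures m densities out) := by unfold Spec_mix_mixtures; infer_instance

-- ===== CLAIM (what is proved, stated in full; the proofs are below) =====
def Claim_equal_mix_mixtures : Prop := ∀ (m : Int) (densities : List Int), Dom_mix_mixtures m densities → Pre_mix_mixtures m densities → Spec_mix_mixtures m densities (mix_mixtures m densities)

-- ===== LEMMAS AND PROOFS =====

theorem min?_le' {l : List Int} {v a : Int} (h : l.min? = some v) (ha : a ∈ l) : v ≤ a := by
  rw [List.min?_eq_some_iff] at h
  exact h.2 a ha

theorem pyHeapify_perm (l : List Int) : (pyHeapify l).Perm l := by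
  unfold pyHeapify
  cases hm : l.min? with
  | none => simp [List.min?_eq_none_iff.mp hm]
  | some v => exact (List.perm_cons_erase (List.min?_mem hm)).symm

theorem pyHeapify_headMin (l : List Int) :
    ∀ x ∈ (pyHeapify l).head?, ∀ a ∈ pyHeapify l, x ≤ a := by
  unfold pyHeapify
  cases hm : l.min? with
  | none => simp
  | some v =>
    intro x hx a ha
    simp at hx
    subst hx
    rcases List.mem_cons.mp ha with h | h
    · exact le_of_eq h.symm
    · exact min?_le' hm (List.mem_of_mem_erase h)

theorem insortLin_perm (v : Int) (s : List Int) : (insortLin v s).Perm (v :: s) := by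
  induction s with
  | nil => exact List.Perm.refl _
  | cons a t ih =>
    simp only [insortLin]
    split
    · exact (ih.cons a).trans (List.Perm.swap v a t)
    · exact List.Perm.refl _

theorem insortLin_pairwise (v : Int) (s : List Int) (hs : s.Pairwise (· ≤ ·)) :
    (insortLin v s).Pairwise (· ≤ ·) := by
  induction s with
  | nil => simp [insortLin]
  | cons a t ih =>
    rcases List.pairwise_cons.mp hs with ⟨ha, ht⟩
    simp only [insortLin]
    split
    · rename_i hav
      refine List.pairwise_cons.mpr ⟨?_, ih ht⟩
      intro b hb
      rcases List.mem_cons.mp ((insortLin_perm v t).mem_iff.mp hb) with hb' | hb'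
      · subst hb'; exact hav
      · exact ha b hb'
    · rename_i hav
      have hva : v ≤ a := le_of_not_ge hav
      refine List.pairwise_cons.mpr ⟨?_, hs⟩
      intro b hb
      rcases List.mem_cons.mp hb with hb' | hb'
      · subst hb'; exact hva
      · exact hva.trans (ha b hb')

theorem loop_eq (m : Int) : ∀ (n : Nat) (h s : List Int) (ops : Int),
    h.length = n → h.Perm s → s.Pairwise (· ≤ ·) →
    (∀ x ∈ h.head?, ∀ a ∈ h, x ≤ a) →
    mixLoopA m h ops = mixLoopB m s ops := by
  intro n
  induction n using Nat.strong_induction_on with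
  | _ n ih =>
    intro h s ops hlen hperm hsort hmin
    match h with
    | [] =>
      have hs0 : s = [] := List.perm_nil.mp hperm.symm
      subst hs0; rw [mixLoopA, mixLoopB]
    | [x] =>
      have hs1 : s = [x] := (List.singleton_perm.mp hperm).symm
      subst hs1; rw [mixLoopA, mixLoopB]
    | x :: y :: t =>
      -- s has the same length ≥ 2
      match s with
      | [] => exact absurd hperm.length_eq (by simp)
      | [a] => exact absurd hperm.length_eq (by simp)
      | a :: b :: s'' =>
        -- the heads agree: both are the minimum of the common multiset
        have hxa : x = a := by
          have hx_le : ∀ c ∈ x :: y :: t, x ≤ c := by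
            intro c hc; exact hmin x (by simp) c hc
          have ha_le : ∀ c ∈ a :: b :: s'', a ≤ c := by
            intro c hc
            rcases List.mem_cons.mp hc with hc' | hc'
            · exact le_of_eq hc'.symm
            · exact List.rel_of_pairwise_cons hsort hc'
          have h1 : x ≤ a := hx_le a (hperm.mem_iff.mpr (by simp))
          have h2 : a ≤ x := ha_le x (hperm.mem_iff.mp (by simp))
          exact le_antisymm h1 h2
        subst hxa
        -- the second pops agree likewise
        cases hm2 : (y :: t).min? with
        | none => simp at hm2
        | some v =>
          have hperm' : (y :: t).Perm (b :: s'') := hperm.cons_inv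
          have hvb : v = b := by
            have hb_le : ∀ c ∈ b :: s'', b ≤ c := by
              intro c hc
              rcases List.mem_cons.mp hc with hc' | hc'
              · exact le_of_eq hc'.symm
              · exact List.rel_of_pairwise_cons (List.pairwise_cons.mp hsort).2 hc'
            have h1 : v ≤ b := min?_le' hm2 (hperm'.mem_iff.mpr (by simp))
            have h2 : b ≤ v := hb_le v (hperm'.mem_iff.mp (List.min?_mem hm2))
            exact le_antisymm h1 h2
          subst hvb
          have hheap1 : pyHeapify (y :: t) = v :: (y :: t).erase v := by
            unfold pyHeapify; rw [hm2]
          rw [mixLoopA, mixLoopB]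
          simp only [hheap1, List.headD_cons, List.tail_cons]
          by_cases hxm : x < m
          · simp only [if_pos hxm]
            -- recurse: apply the IH to the new states
            have hbmem : v ∈ y :: t := List.min?_mem hm2
            have herase : ((y :: t).erase v).Perm s'' := by
              have := hperm'.erase v
              rwa [List.erase_cons_head] at this
            have hnewperm : (pyHeappush (x + 2 * v) ((y :: t).erase v)).Perm (insortLin (x + 2 * v) s'') := by
              refine (pyHeapify_perm _).trans ?_
              exact (herase.cons _).trans (insortLin_perm _ _).symm
            have hnewlen : (pyHeappush (x + 2 * v) ((y :: t).erase v)).length = t.length + 1 := by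
              simp [pyHeappush, pyHeapify_length, List.length_erase_of_mem hbmem]
            have hnewsort : (insortLin (x + 2 * v) s'').Pairwise (· ≤ ·) :=
              insortLin_pairwise _ _ ((List.pairwise_cons.mp (List.pairwise_cons.mp hsort).2).2)
            have hn : t.length + 2 = n := by simpa using hlen
            exact ih (t.length + 1) (by omega) _ _ (ops + 1) hnewlen hnewperm hnewsort
              (pyHeapify_headMin _)
          · simp [if_neg hxm]

-- ===== VERDICT (by name: the statement is the Claim_ definition above) =====
theorem mix_mixtures_spec : Claim_equal_mix_mixtures := by
  intro m densities _ _
  unfold Spec_mix_mixtures mix_mixtures mix_mixtures_alt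
  refine loop_eq m (pyHeapify densities).length (pyHeapify densities) _ 0 rfl ?_ ?_ (pyHeapify_headMin densities)
  · exact (pyHeapify_perm densities).trans (PySem.List.sorted_perm ..).symm
  · have := PySem.List.sorted_pairwise (xs := densities) (key := fun x => x)
    simpa using this
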